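-- pv_equiv track=rewrite | github.com/bruno-ah-um/advent_of_code_2025 | 09/09.py | part2
-- ===== SOURCE A (Python) =====
-- def part2(coordinates):
--     n = len(coordinates)
--
--     def get_size(x1, y1, x2, y2):
--         x = abs(x1 - x2) + 1
--         y = abs(y1 - y2) + 1
--         return x * y
--
--     edges = []
--     sizes = []
--     for i in range(n):
--         edges.append(sorted((coordinates[i], coordinates[i-1])))
--         for j in range(i+1, n):
--             c1, c2 = sorted((coordinates[i], coordinates[j]))
--             sizes.append((get_size(*c1, *c2), c1, c2))
--
--     edges.sort(reverse=True, key=lambda e: get_size(*e[0], *e[1]))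
--     sizes.sort(reverse=True)
--
--     for size, (x1, y1), (x2, y2) in sizes:
--         y1, y2 = sorted((y1, y2))
--         if not any(
--             (x4 > x1 and x3 < x2 and y4 > y1 and y3 < y2)
--             for (x3, y3), (x4, y4) in edges
--         ):
--             return size
-- ===== SOURCE B (Python) =====
-- def part2(coordinates):
--     n = len(coordinates)
--     edges = [sorted((coordinates[i], coordinates[i - 1])) for i in range(n)]
--     best = None
--     for i in range(n):
--         xi, yi = coordinates[i]
--         for j in range(i + 1, n):
--             xj, yj = coordinates[j]
--             x1, x2 = min(xi, xj), max(xi, xj)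
--             y1, y2 = min(yi, yj), max(yi, yj)
--             if not any(x4 > x1 and x3 < x2 and y4 > y1 and y3 < y2
--                        for (x3, y3), (x4, y4) in edges):
--                 size = (x2 - x1 + 1) * (y2 - y1 + 1)
--                 if best is None or size > best:
--                     best = size
--     return best
-- ===== Notes on version B (the rewrite author's own statement) =====
-- stated objective: simpler
-- what changed: B drops A's materialised sizes list and both sorts entirely: it normalises each pair to its bounding box with min/max (instead of lexicographically sorting the point pair and re-sorting the y's) and tracks the running maximum of valid rectangle sizes in a single scan over the pairs, returning None when no pair is valid.
import Mathlib
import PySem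

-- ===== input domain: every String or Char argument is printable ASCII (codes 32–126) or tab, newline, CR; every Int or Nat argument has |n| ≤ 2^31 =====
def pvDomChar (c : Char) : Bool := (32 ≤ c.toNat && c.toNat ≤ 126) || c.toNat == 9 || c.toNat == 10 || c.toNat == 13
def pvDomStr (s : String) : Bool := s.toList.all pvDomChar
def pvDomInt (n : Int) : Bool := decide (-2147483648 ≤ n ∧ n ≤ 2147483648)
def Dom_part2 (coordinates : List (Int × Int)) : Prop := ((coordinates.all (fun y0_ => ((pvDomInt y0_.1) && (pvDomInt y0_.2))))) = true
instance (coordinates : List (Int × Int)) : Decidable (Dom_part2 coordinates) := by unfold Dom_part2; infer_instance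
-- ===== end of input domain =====

-- B replaces A's materialised all-pairs sizes list and its two sorts by a single
-- max-tracking scan over the pairs with min/max bounding-box normalisation (objective: simpler).

-- ===== PORT A =====

-- get_size(x1, y1, x2, y2)
def pvGetSize (x1 y1 x2 y2 : Int) : Int := (|x1 - x2| + 1) * (|y1 - y2| + 1)

-- Python 'sorted((p, q))' on two int pairs: stable 2-element sort by the tuple
-- lexicographic '<' (exact for int pairs)
def pvSortPair (p q : Int × Int) : (Int × Int) × (Int × Int) :=
  if q.1 < p.1 ∨ (q.1 = p.1 ∧ q.2 < p.2) then (q, p) else (p, q)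

-- A's final 'for size, (x1, y1), (x2, y2) in sizes' loop; 'y1, y2 = sorted((y1, y2))'
-- on two ints is min/max (exact)
def pvFindA (edges : List ((Int × Int) × (Int × Int))) :
    List (Int × (Int × Int) × (Int × Int)) → Option Int
  | [] => none
  | t :: rest =>
    if edges.any (fun e =>
        decide (e.2.1 > t.2.1.1 ∧ e.1.1 < t.2.2.1 ∧
                e.2.2 > min t.2.1.2 t.2.2.2 ∧ e.1.2 < max t.2.1.2 t.2.2.2)) then
      pvFindA edges rest
    else some t.1

def part2 (coordinates : List (Int × Int)) : Option Int :=
  let n : Int := coordinates.length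
  -- one loop over i building edges (appending sorted((coords[i], coords[i-1])))
  -- and, in the nested j-loop, sizes (appending (get_size(*c1, *c2), c1, c2))
  let st := (PySem.List.pyRange 0 n 1).foldl
    (fun (st : List ((Int × Int) × (Int × Int)) × List (Int × (Int × Int) × (Int × Int))) i =>
      (st.1 ++ [pvSortPair (PySem.List.pyGetD coordinates i (0, 0))
                           (PySem.List.pyGetD coordinates (i - 1) (0, 0))],
       (PySem.List.pyRange (i + 1) n 1).foldl
         (fun acc j =>
           let c := pvSortPair (PySem.List.pyGetD coordinates i (0, 0))
                               (PySem.List.pyGetD coordinates j (0, 0))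
           acc ++ [(pvGetSize c.1.1 c.1.2 c.2.1 c.2.2, c)])
         st.2))
    ([], [])
  pvFindA
    -- edges.sort(reverse=True, key=lambda e: get_size(*e[0], *e[1]))
    (PySem.List.sorted st.1 (fun e => pvGetSize e.1.1 e.1.2 e.2.1 e.2.2) true)
    -- sizes.sort(reverse=True): Python lexicographic order on the nested int tuple,
    -- rendered as the (lexicographic) order on the 5-element List Int key
    (PySem.List.sorted st.2 (fun t => [t.1, t.2.1.1, t.2.1.2, t.2.2.1, t.2.2.2]) true)

-- ===== PORT B =====

def part2_alt (coordinates : List (Int × Int)) : Option Int :=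
  let n : Int := coordinates.length
  let edges := (PySem.List.pyRange 0 n 1).foldl
    (fun acc i => acc ++ [pvSortPair (PySem.List.pyGetD coordinates i (0, 0))
                                     (PySem.List.pyGetD coordinates (i - 1) (0, 0))]) []
  (PySem.List.pyRange 0 n 1).foldl
    (fun best i =>
      let p := PySem.List.pyGetD coordinates i (0, 0)
      (PySem.List.pyRange (i + 1) n 1).foldl
        (fun best j =>
          let q := PySem.List.pyGetD coordinates j (0, 0)
          if edges.any (fun e =>
              decide (e.2.1 > min p.1 q.1 ∧ e.1.1 < max p.1 q.1 ∧
                      e.2.2 > min p.2 q.2 ∧ e.1.2 < max p.2 q.2)) then best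
          else
            let size := (max p.1 q.1 - min p.1 q.1 + 1) * (max p.2 q.2 - min p.2 q.2 + 1)
            match best with
            | none => some size
            | some b => if size > b then some size else some b)
        best)
    none

-- ===== PRECONDITION & SPEC =====
def Spec_part2 (coordinates : List (Int × Int)) (out : Option Int) : Prop := out = part2_alt coordinates
instance (coordinates : List (Int × Int)) (out : Option Int) : Decidable (Spec_part2 coordinates out) := by unfold Spec_part2; infer_instance

-- ===== CLAIM (what is proved, stated in full; the proofs are below) =====
def Claim_equal_part2 : Prop := ∀ (coordinates : List (Int × Int)), Dom_part2 coordinates → Spec_part2 coordinates (part2 coordinates)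

-- ===== LEMMAS AND PROOFS =====

-- proof-side abbreviations
def pvPt (c : List (Int × Int)) (i : Int) : Int × Int := PySem.List.pyGetD c i (0, 0)

def pvE (c : List (Int × Int)) : List ((Int × Int) × (Int × Int)) :=
  (PySem.List.pyRange 0 (c.length : Int) 1).foldl
    (fun acc i => acc ++ [pvSortPair (pvPt c i) (pvPt c (i - 1))]) []

def pvCand (c : List (Int × Int)) (i j : Int) : Int × (Int × Int) × (Int × Int) :=
  let s := pvSortPair (pvPt c i) (pvPt c j)
  (pvGetSize s.1.1 s.1.2 s.2.1 s.2.2, s)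

def pvL (c : List (Int × Int)) : List (Int × (Int × Int) × (Int × Int)) :=
  (PySem.List.pyRange 0 (c.length : Int) 1).flatMap
    (fun i => (PySem.List.pyRange (i + 1) (c.length : Int) 1).map (pvCand c i))

def pvGood (c : List (Int × Int)) (t : Int × (Int × Int) × (Int × Int)) : Bool :=
  !(pvE c).any (fun e =>
      decide (e.2.1 > t.2.1.1 ∧ e.1.1 < t.2.2.1 ∧
              e.2.2 > min t.2.1.2 t.2.2.2 ∧ e.1.2 < max t.2.1.2 t.2.2.2))

def pvStep (c : List (Int × Int)) (best : Option Int) (t : Int × (Int × Int) × (Int × Int)) :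
    Option Int :=
  if pvGood c t then
    match best with
    | none => some t.1
    | some b => if t.1 > b then some t.1 else some b
  else best

def pvBestVal (c : List (Int × Int)) (M : List (Int × (Int × Int) × (Int × Int))) : Option Int :=
  ((M.filter (pvGood c)).map (·.1)).max?

-- generic facts
theorem pv_max?_perm {l k : List Int} (h : l.Perm k) : l.max? = k.max? := by
  cases hk : k.max? with
  | none =>
    rw [List.max?_eq_none_iff] at hk
    subst hk
    rw [List.max?_eq_none_iff]
    exact h.eq_nil
  | some a =>
    rw [List.max?_eq_some_iff] at hk ⊢
    exact ⟨h.mem_iff.mpr hk.1, fun b hb => hk.2 b (h.mem_iff.mp hb)⟩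

theorem pv_foldl_max_of_le {l : List Int} {b : Int} (h : ∀ x ∈ l, x ≤ b) :
    l.foldl max b = b := by
  induction l with
  | nil => rfl
  | cons x t ih =>
    simp only [List.foldl_cons]
    rw [max_eq_left (h x (by simp))]
    exact ih fun y hy => h y (by simp [hy])

-- heads of lexicographically ≤ int lists
theorem pv_listint_head_le {a b : Int} {r s : List Int} (h : (a :: r : List Int) ≤ b :: s) :
    a ≤ b := by
  by_contra hba
  exact absurd (List.Lex.rel (by omega) : (b :: s : List Int) < a :: r) (not_lt.mpr h)

-- the bounding-box normalisation: pvSortPair vs min/max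
theorem pv_abs_sub (a b : Int) : |a - b| = max a b - min a b := by
  rcases abs_cases (a - b) with ⟨h1, h2⟩ | ⟨h1, h2⟩ <;> omega

theorem pv_sortPair_x1 (p q : Int × Int) : (pvSortPair p q).1.1 = min p.1 q.1 := by
  unfold pvSortPair; split_ifs with h <;> dsimp only <;> omega

theorem pv_sortPair_x2 (p q : Int × Int) : (pvSortPair p q).2.1 = max p.1 q.1 := by
  unfold pvSortPair; split_ifs with h <;> dsimp only <;> omega

theorem pv_sortPair_ymin (p q : Int × Int) :
    min (pvSortPair p q).1.2 (pvSortPair p q).2.2 = min p.2 q.2 := by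
  unfold pvSortPair; split_ifs with h <;> dsimp only <;> omega

theorem pv_sortPair_ymax (p q : Int × Int) :
    max (pvSortPair p q).1.2 (pvSortPair p q).2.2 = max p.2 q.2 := by
  unfold pvSortPair; split_ifs with h <;> dsimp only <;> omega

theorem pv_sortPair_size (p q : Int × Int) :
    pvGetSize (pvSortPair p q).1.1 (pvSortPair p q).1.2
      (pvSortPair p q).2.1 (pvSortPair p q).2.2
      = (max p.1 q.1 - min p.1 q.1 + 1) * (max p.2 q.2 - min p.2 q.2 + 1) := by
  unfold pvSortPair pvGetSize
  split_ifs with h <;> dsimp only <;>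
    rw [pv_abs_sub, pv_abs_sub] <;> rw [max_comm q.1, min_comm q.1, max_comm q.2, min_comm q.2]

-- A's interleaved pair-state loop, split into its two independent components
theorem pv_partA_state (c : List (Int × Int)) :
    ((PySem.List.pyRange 0 (c.length : Int) 1).foldl
      (fun (st : List ((Int × Int) × (Int × Int)) × List (Int × (Int × Int) × (Int × Int))) i =>
        (st.1 ++ [pvSortPair (PySem.List.pyGetD c i (0, 0))
                             (PySem.List.pyGetD c (i - 1) (0, 0))],
         (PySem.List.pyRange (i + 1) (c.length : Int) 1).foldl
           (fun acc j =>
             let s := pvSortPair (PySem.List.pyGetD c i (0, 0))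
                                 (PySem.List.pyGetD c j (0, 0))
             acc ++ [(pvGetSize s.1.1 s.1.2 s.2.1 s.2.2, s)])
           st.2))
      ([], []))
    = (pvE c, pvL c) := by
  rw [PySem.List.foldl_prod_mk
    (fun s i => s ++ [pvSortPair (PySem.List.pyGetD c i (0, 0))
                                 (PySem.List.pyGetD c (i - 1) (0, 0))])
    (fun s i => (PySem.List.pyRange (i + 1) (c.length : Int) 1).foldl
      (fun acc j =>
        let t := pvSortPair (PySem.List.pyGetD c i (0, 0)) (PySem.List.pyGetD c j (0, 0))
        acc ++ [(pvGetSize t.1.1 t.1.2 t.2.1 t.2.2, t)]) s)]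
  rw [Prod.mk.injEq]
  refine ⟨rfl, ?_⟩
  show _ = pvL c
  unfold pvL
  refine (PySem.List.foldl_congr_mem _ _
    (fun s i => s ++ (PySem.List.pyRange (i + 1) (c.length : Int) 1).map (pvCand c i)) []
    ?_).trans ?_
  · intro acc i _
    exact PySem.List.foldl_append_singleton_eq_map (pvCand c i) _ acc
  · rw [PySem.List.foldl_append_eq_flatMap, List.nil_append]

-- B's double loop is the generic max-tracking fold over the candidate list pvL
theorem pv_partB_eq (c : List (Int × Int)) :
    part2_alt c = (pvL c).foldl (pvStep c) none := by
  unfold part2_alt pvL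
  rw [List.foldl_flatMap]
  apply PySem.List.foldl_congr_mem
  intro best i _
  rw [List.foldl_map]
  apply PySem.List.foldl_congr_mem
  intro b j _
  show (if (pvE c).any _ then b else _) = pvStep c b (pvCand c i j)
  simp only [pvStep, pvGood, pvCand, pvPt]
  rw [pv_sortPair_size]
  simp only [pv_sortPair_x1, pv_sortPair_x2, pv_sortPair_ymin, pv_sortPair_ymax]
  by_cases h : ((pvE c).any fun e =>
      decide (e.2.1 > min (PySem.List.pyGetD c i (0, 0)).1 (PySem.List.pyGetD c j (0, 0)).1 ∧
        e.1.1 < max (PySem.List.pyGetD c i (0, 0)).1 (PySem.List.pyGetD c j (0, 0)).1 ∧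
        e.2.2 > min (PySem.List.pyGetD c i (0, 0)).2 (PySem.List.pyGetD c j (0, 0)).2 ∧
        e.1.2 < max (PySem.List.pyGetD c i (0, 0)).2 (PySem.List.pyGetD c j (0, 0)).2)) = true
  · rw [if_pos h, h]
    simp
  · rw [if_neg h]
    rw [Bool.not_eq_true] at h
    rw [h]
    simp

-- the max-tracking fold computes max? of the valid sizes
theorem pv_foldl_step_some (c : List (Int × Int)) (M : List (Int × (Int × Int) × (Int × Int)))
    (b : Int) :
    M.foldl (pvStep c) (some b) = some (((M.filter (pvGood c)).map (·.1)).foldl max b) := by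
  induction M generalizing b with
  | nil => rfl
  | cons t M ih =>
    by_cases h : pvGood c t = true
    · rw [List.foldl_cons, List.filter_cons_of_pos h, List.map_cons, List.foldl_cons,
        show pvStep c (some b) t = some (max b t.1) from by
          unfold pvStep
          rw [if_pos h]
          show (if t.1 > b then some t.1 else some b) = some (max b t.1)
          by_cases h2 : t.1 > b
          · rw [if_pos h2, max_eq_right (le_of_lt h2)]
          · rw [if_neg h2, max_eq_left (by omega)]]
      exact ih (max b t.1)
    · rw [List.foldl_cons, List.filter_cons_of_neg h,
        show pvStep c (some b) t = some b from by unfold pvStep; rw [if_neg h]]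
      exact ih b

theorem pv_foldl_step_none (c : List (Int × Int)) (M : List (Int × (Int × Int) × (Int × Int))) :
    M.foldl (pvStep c) none = pvBestVal c M := by
  induction M with
  | nil => rfl
  | cons t M ih =>
    by_cases h : pvGood c t = true
    · rw [List.foldl_cons, show pvStep c none t = some t.1 from by unfold pvStep; rw [if_pos h],
        pv_foldl_step_some]
      unfold pvBestVal
      rw [List.filter_cons_of_pos h, List.map_cons, List.max?_cons']
    · rw [List.foldl_cons, show pvStep c none t = none from by unfold pvStep; rw [if_neg h]]
      unfold pvBestVal
      rw [List.filter_cons_of_neg h]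
      exact ih

-- pvBestVal is invariant under permutation of the candidate list
theorem pv_bestVal_perm (c : List (Int × Int)) {M M' : List (Int × (Int × Int) × (Int × Int))}
    (h : M.Perm M') : pvBestVal c M = pvBestVal c M' := by
  unfold pvBestVal
  exact pv_max?_perm ((h.filter (pvGood c)).map (·.1))

-- A's scan of the size-descending candidate list returns the max valid size
theorem pv_findA_eq_bestVal (c : List (Int × Int))
    (M : List (Int × (Int × Int) × (Int × Int)))
    (hM : M.Pairwise (fun a b => b.1 ≤ a.1)) :
    pvFindA (PySem.List.sorted (pvE c) (fun e => pvGetSize e.1.1 e.1.2 e.2.1 e.2.2) true) M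
      = pvBestVal c M := by
  induction M with
  | nil => rfl
  | cons t M ih =>
    rcases List.pairwise_cons.mp hM with ⟨hhd, htl⟩
    have hany : ((PySem.List.sorted (pvE c) (fun e => pvGetSize e.1.1 e.1.2 e.2.1 e.2.2)
        true).any fun e =>
          decide (e.2.1 > t.2.1.1 ∧ e.1.1 < t.2.2.1 ∧
                  e.2.2 > min t.2.1.2 t.2.2.2 ∧ e.1.2 < max t.2.1.2 t.2.2.2))
        = !pvGood c t := by
      unfold pvGood
      rw [List.Perm.any_eq (PySem.List.sorted_perm _ _ _), Bool.not_not]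
    by_cases h : pvGood c t = true
    · unfold pvFindA
      rw [if_neg (by rw [hany, h]; simp)]
      unfold pvBestVal
      rw [List.filter_cons_of_pos h, List.map_cons, List.max?_cons',
        pv_foldl_max_of_le (fun x hx => ?_)]
      rcases List.mem_map.mp hx with ⟨u, hu, rfl⟩
      exact hhd u (List.mem_of_mem_filter hu)
    · unfold pvFindA
      rw [if_pos (by rw [hany, show pvGood c t = false by simpa using h]; rfl)]
      unfold pvBestVal
      rw [List.filter_cons_of_neg h]
      exact ih htl

-- the two (definitionally intensionally different, propositionally equal) lexicographic
-- List Int order instances give the same sort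
theorem pv_sorted_swap (M : List (Int × (Int × Int) × (Int × Int))) :
    PySem.List.sorted M (fun t => ([t.1, t.2.1.1, t.2.1.2, t.2.2.1, t.2.2.2] : List Int)) true
      = @PySem.List.sorted _ _ List.instLinearOrder.toLT LinearOrder.toDecidableLT M
          (fun t => [t.1, t.2.1.1, t.2.1.2, t.2.2.1, t.2.2.2]) true := by
  unfold PySem.List.sorted
  dsimp only
  congr 1
  funext acc x
  congr 1
  funext a b
  exact decide_eq_decide.mpr Iff.rfl

-- the sorted candidate list is weakly size-descending
theorem pv_sorted_sizes_pairwise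
    (M : List (Int × (Int × Int) × (Int × Int))) :
    (PySem.List.sorted M (fun t => ([t.1, t.2.1.1, t.2.1.2, t.2.2.1, t.2.2.2] : List Int))
        true).Pairwise (fun a b => b.1 ≤ a.1) := by
  rw [pv_sorted_swap]
  exact (PySem.List.sorted_pairwise_rev M
    (fun t => ([t.1, t.2.1.1, t.2.1.2, t.2.2.1, t.2.2.2] : List Int))).imp
    (fun {a b} h => pv_listint_head_le h)

-- ===== VERDICT (by name: the statement is the Claim_ definition above) =====
theorem part2_spec : Claim_equal_part2 := by
  intro c _
  show part2 c = part2_alt c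
  unfold part2
  dsimp only
  rw [pv_partA_state c]
  rw [pv_findA_eq_bestVal c _ (pv_sorted_sizes_pairwise (pvL c)),
      pv_bestVal_perm c (PySem.List.sorted_perm _ _ _),
      pv_partB_eq, pv_foldl_step_none]
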